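-- pv_equiv track=rewrite | github.com/nmrs/sotd_pipeline | sotd/report/table_generators/base.py | _format_ranks_with_ties
-- ===== SOURCE A (Python) =====
-- def _format_ranks_with_ties(ranks: list[int]) -> list[str]:
--     """Format numeric ranks with tie indicators.
--
--     Args:
--         ranks: List of numeric rank values (e.g., [1, 2, 2, 3])
--
--     Returns:
--         List of formatted rank strings with tie indicators (e.g., ["1", "2=", "2=", "3"])
--     """
--     if not ranks:
--         return []
--
--     if len(ranks) == 1:
--         return [str(ranks[0])]
--
--     formatted = []
--     for i, rank in enumerate(ranks):
--         # Check if this rank is tied with the next rank (forward-looking)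
--         # or if this rank is tied with the previous rank (backward-looking)
--         is_tied = False
--
--         # Check if tied with next rank
--         if i < len(ranks) - 1 and rank == ranks[i + 1]:
--             is_tied = True
--
--         # Check if tied with previous rank
--         if i > 0 and rank == ranks[i - 1]:
--             is_tied = True
--
--         if is_tied:
--             formatted.append(f"{rank}=")
--         else:
--             formatted.append(str(rank))
--
--     return formatted
-- ===== SOURCE B (Python) =====
-- def _format_ranks_with_ties(ranks: list[int]) -> list[str]:
--     """Run-segmentation: find each maximal run of equal ranks and format it at once."""
--     out = []
--     i = 0
--     n = len(ranks)
--     while i < n: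
--         j = i + 1
--         while j < n and ranks[j] == ranks[i]:
--             j += 1
--         if j - i > 1:
--             out += [f"{ranks[i]}="] * (j - i)
--         else:
--             out.append(str(ranks[i]))
--         i = j
--     return out
-- ===== Notes on version B (the rewrite author's own statement) =====
-- stated objective: simpler
-- what changed: Replaced the per-index forward/backward neighbor comparisons (with global indexing into the list) by a run-segmentation recursion: each maximal run of equal ranks is found once and formatted at once, with no indices and no special cases for empty or singleton input.
import Mathlib
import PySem

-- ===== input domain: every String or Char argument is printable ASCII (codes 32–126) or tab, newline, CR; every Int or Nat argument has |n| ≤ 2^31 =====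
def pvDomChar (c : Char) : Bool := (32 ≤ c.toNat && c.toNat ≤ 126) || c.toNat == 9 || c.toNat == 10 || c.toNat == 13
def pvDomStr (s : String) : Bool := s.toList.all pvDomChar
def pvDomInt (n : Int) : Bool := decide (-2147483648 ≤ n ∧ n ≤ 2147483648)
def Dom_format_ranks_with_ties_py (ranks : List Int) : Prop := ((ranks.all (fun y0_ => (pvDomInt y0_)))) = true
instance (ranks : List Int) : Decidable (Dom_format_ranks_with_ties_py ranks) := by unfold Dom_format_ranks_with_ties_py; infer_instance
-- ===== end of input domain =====

-- B replaces A's per-index forward/backward neighbor checks by a run-segmentation recursion (simpler decomposition, same cost).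


-- ===== PORT A =====
-- is_tied: A's two guarded neighbor checks, in A's order (forward check, then backward check);
-- the guards keep the index in range, so pyGetD's default is never read
def pvTiedA (ranks : List Int) (i r : Int) : Bool :=
  let t := false
  let t := if i < (ranks.length : Int) - 1 ∧ PySem.List.pyGetD ranks (i + 1) 0 = r then true else t
  let t := if 0 < i ∧ PySem.List.pyGetD ranks (i - 1) 0 = r then true else t
  t

def format_ranks_with_ties_py (ranks : List Int) : List String :=
  if ranks = [] then []
  else if ranks.length = 1 then [PySem.Int.toStr (PySem.List.pyGetD ranks 0 0)]
  else
    (PySem.List.enumerate ranks).foldl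
      (fun formatted p =>
        if pvTiedA ranks p.1 p.2 then formatted ++ [PySem.Int.toStr p.2 ++ "="]
        else formatted ++ [PySem.Int.toStr p.2]) []

-- ===== PORT B =====
def format_ranks_with_ties_py_alt (ranks : List Int) : List String :=
  match ranks with
  | [] => []
  | r :: rest =>
    let k := (rest.takeWhile (fun x => x == r)).length + 1
    let head := if k > 1 then List.replicate k (PySem.Int.toStr r ++ "=") else [PySem.Int.toStr r]
    head ++ format_ranks_with_ties_py_alt (rest.dropWhile (fun x => x == r))
termination_by ranks.length
decreasing_by
  have := List.length_dropWhile_le (fun x => x == r) rest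
  simp only [List.length_cons]; omega

-- ===== PRECONDITION & SPEC =====
def Spec_format_ranks_with_ties_py (ranks : List Int) (out : List String) : Prop := out = format_ranks_with_ties_py_alt ranks
instance (ranks : List Int) (out : List String) : Decidable (Spec_format_ranks_with_ties_py ranks out) := by unfold Spec_format_ranks_with_ties_py; infer_instance

-- ===== CLAIM (what is proved, stated in full; the proofs are below) =====
def Claim_equal_format_ranks_with_ties_py : Prop := ∀ (ranks : List Int), Dom_format_ranks_with_ties_py ranks → Spec_format_ranks_with_ties_py ranks (format_ranks_with_ties_py ranks)

-- ===== LEMMAS AND PROOFS =====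

-- reference form: walk the list carrying the previous element; an entry is tied iff it equals prev or next
def pvGo2 (prev : Option Int) : List Int → List String
  | [] => []
  | r :: rest =>
    (if prev = some r ∨ rest.head? = some r then [PySem.Int.toStr r ++ "="] else [PySem.Int.toStr r])
      ++ pvGo2 (some r) rest

theorem pvFoldA_eq_map (ranks : List Int) (l : List (Int × Int)) (acc : List String) :
    l.foldl (fun formatted p =>
        if pvTiedA ranks p.1 p.2 then formatted ++ [PySem.Int.toStr p.2 ++ "="]
        else formatted ++ [PySem.Int.toStr p.2]) acc
    = acc ++ l.map (fun p => if pvTiedA ranks p.1 p.2 then PySem.Int.toStr p.2 ++ "=" else PySem.Int.toStr p.2) := by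
  induction l generalizing acc with
  | nil => simp
  | cons p l ih =>
    simp only [List.foldl_cons, List.map_cons]
    by_cases h : pvTiedA ranks p.1 p.2 = true <;> simp [h, ih]

-- A's tied test at position pre.length of pre ++ r :: rest reads exactly "r equals last of pre or head of rest"
theorem pvTiedA_char (pre rest : List Int) (r : Int) :
    pvTiedA (pre ++ r :: rest) (pre.length : Int) r
      = decide (pre.getLast? = some r ∨ rest.head? = some r) := by
  have hc1 : ((pre.length : Int) < ((pre ++ r :: rest).length : Int) - 1 ∧
      PySem.List.pyGetD (pre ++ r :: rest) ((pre.length : Int) + 1) 0 = r) ↔ rest.head? = some r := by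
    cases rest with
    | nil => simp
    | cons x rest2 =>
      have hcast : ((pre.length : Int) + 1) = ((pre.length + 1 : Nat) : Int) := by push_cast; ring
      rw [hcast, PySem.List.pyGetD_natCast]
      simp [List.getD]
      intro _; omega
  have hc2 : (0 < (pre.length : Int) ∧
      PySem.List.pyGetD (pre ++ r :: rest) ((pre.length : Int) - 1) 0 = r) ↔ pre.getLast? = some r := by
    rcases List.eq_nil_or_concat pre with rfl | ⟨l, p, rfl⟩
    · simp
    · simp only [List.concat_eq_append]
      have hcast : (((l ++ [p]).length : Int) - 1) = ((l.length : Nat) : Int) := by simp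
      rw [hcast, PySem.List.pyGetD_natCast]
      rw [List.getD, List.getElem?_append_left (by simp : l.length < (l ++ [p]).length)]
      simp
  simp only [pvTiedA]
  simp only [hc1, hc2]
  by_cases h1 : pre.getLast? = some r <;> by_cases h2 : rest.head? = some r <;> simp [h1, h2]

theorem pvMap_eq_go2 (suf : List Int) : ∀ (pre : List Int),
    (PySem.List.enumerate suf (pre.length : Int)).map
      (fun p => if pvTiedA (pre ++ suf) p.1 p.2 then PySem.Int.toStr p.2 ++ "=" else PySem.Int.toStr p.2)
    = pvGo2 pre.getLast? suf := by
  induction suf with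
  | nil => intro pre; simp [pvGo2, PySem.List.enumerate]
  | cons r rest ih =>
    intro pre
    rw [PySem.List.enumerate_cons, List.map_cons]
    have htail := ih (pre ++ [r])
    have hc : (((pre ++ [r]).length : Nat) : Int) = (pre.length : Int) + 1 := by simp
    rw [hc, List.append_assoc, List.singleton_append, List.getLast?_concat] at htail
    rw [htail, pvTiedA_char, pvGo2]
    by_cases h : pre.getLast? = some r ∨ rest.head? = some r <;> simp [h]

theorem pvGo2_replicate (r : Int) (k : Nat) (rest : List Int) :
    pvGo2 (some r) (List.replicate k r ++ rest)
      = List.replicate k (PySem.Int.toStr r ++ "=") ++ pvGo2 (some r) rest := by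
  induction k with
  | zero => simp
  | succ k ih => simp [List.replicate_succ, pvGo2, ih]

theorem pvTakeWhile_eq_replicate (r : Int) (l : List Int) :
    l.takeWhile (fun x => x == r) = List.replicate (l.takeWhile (fun x => x == r)).length r := by
  apply List.eq_replicate_of_mem
  intro x hx
  have := List.mem_takeWhile_imp hx
  simpa using this

theorem pvHead?_dropWhile (r : Int) (l : List Int) :
    ∀ x, (l.dropWhile (fun x => x == r)).head? = some x → x ≠ r := by
  intro x hx
  have := List.head?_dropWhile_not (fun x => x == r) l
  rw [hx] at this
  simpa using this

theorem pvGo2_eq_alt (n : Nat) : ∀ (l : List Int) (prev : Option Int),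
    l.length ≤ n → (∀ x, l.head? = some x → prev ≠ some x) →
    pvGo2 prev l = format_ranks_with_ties_py_alt l := by
  induction n with
  | zero =>
    intro l prev h _
    have : l = [] := List.eq_nil_of_length_eq_zero (by omega)
    subst this; simp [pvGo2, format_ranks_with_ties_py_alt]
  | succ n ih =>
    intro l prev hlen hprev
    match l with
    | [] => simp [pvGo2, format_ranks_with_ties_py_alt]
    | r :: rest =>
      have hprev' : prev ≠ some r := hprev r rfl
      have hrec : pvGo2 (some r) (rest.dropWhile (fun x => x == r))
          = format_ranks_with_ties_py_alt (rest.dropWhile (fun x => x == r)) := by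
        apply ih
        · have h1 : (rest.dropWhile (fun x => x == r)).length ≤ rest.length :=
            List.length_dropWhile_le _ _
          simp only [List.length_cons] at hlen; omega
        · intro x hx hc
          injection hc with hc
          exact pvHead?_dropWhile r rest x hx hc.symm
      rw [format_ranks_with_ties_py_alt]
      cases rest with
      | nil => simp [pvGo2, format_ranks_with_ties_py_alt, hprev']
      | cons y t =>
        by_cases hy : y = r
        · subst hy
          have hsp : t = List.replicate (t.takeWhile (fun x => x == y)).length y
              ++ t.dropWhile (fun x => x == y) := by
            conv_lhs => rw [← List.takeWhile_append_dropWhile (p := fun x => x == y) (l := t)]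
            rw [← pvTakeWhile_eq_replicate]
          have hdw : (y :: t).dropWhile (fun x => x == y) = t.dropWhile (fun x => x == y) := by
            simp
          have htw : (y :: t).takeWhile (fun x => x == y) = y :: t.takeWhile (fun x => x == y) := by
            simp
          rw [hdw] at hrec
          rw [pvGo2, if_pos (Or.inr (by simp))]
          rw [htw, hdw]
          rw [if_pos (by simp)]
          have hlhs : pvGo2 (some y) (y :: t)
              = List.replicate ((t.takeWhile (fun x => x == y)).length + 1)
                  (PySem.Int.toStr y ++ "=") ++ pvGo2 (some y) (t.dropWhile (fun x => x == y)) := by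
            conv_lhs => rw [show y :: t = List.replicate ((t.takeWhile (fun x => x == y)).length + 1) y
              ++ t.dropWhile (fun x => x == y) by rw [List.replicate_succ, List.cons_append, ← hsp]]
            exact pvGo2_replicate y _ _
          rw [hlhs, hrec]
          simp [List.replicate_succ]
        · have hyb : (y == r) = false := by simp [hy]
          have htw : (y :: t).takeWhile (fun x => x == r) = [] := by simp [hyb]
          have hdw : (y :: t).dropWhile (fun x => x == r) = y :: t := by simp [hyb]
          rw [hdw] at hrec
          rw [pvGo2, if_neg (by simp [hprev', hy])]
          rw [htw, hdw]
          simp [hrec]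

-- ===== VERDICT (by name: the statement is the Claim_ definition above) =====
theorem format_ranks_with_ties_py_spec : Claim_equal_format_ranks_with_ties_py := by
  intro ranks _
  unfold Spec_format_ranks_with_ties_py format_ranks_with_ties_py
  split_ifs with h1 h2
  · subst h1; simp [format_ranks_with_ties_py_alt]
  · obtain ⟨x, rfl⟩ := List.length_eq_one_iff.mp h2
    simp [PySem.List.pyGetD, format_ranks_with_ties_py_alt]
  · rw [pvFoldA_eq_map, List.nil_append]
    have henum : PySem.List.enumerate ranks
        = PySem.List.enumerate ranks ((([] : List Int).length : Nat) : Int) := rfl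
    rw [henum]
    have hmap := pvMap_eq_go2 ranks []
    rw [List.nil_append] at hmap
    rw [hmap, List.getLast?_nil]
    exact pvGo2_eq_alt ranks.length ranks none le_rfl (by intro x _ hc; cases hc)
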